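-- pv_equiv track=rewrite | github.com/Lucky-Kandpal/chatqa-api | chat_qa.py | handle_topic_qa
-- ===== SOURCE A (Python) =====
-- def retrieve_relevant_messages(query, chat_data, top_k=20):
--     query_words = set(query.lower().split())
--     scored_messages = []
--     for msg in chat_data:
--         msg_words = set(msg["message"].lower().split())
--         score = len(query_words.intersection(msg_words))
--         if score > 0:
--             scored_messages.append((score, msg))
--     scored_messages.sort(key=lambda x: x[0], reverse=True)
--     return [msg for _, msg in scored_messages[:top_k]]
--
-- def handle_topic_qa(query, chat_data):
--     relevant_msgs = retrieve_relevant_messages(query, chat_data, top_k=25)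
--     if not relevant_msgs:
--         return f"No messages found for topic in: '{query}'"
--     context = "\n".join([f"[{m['date']} {m['time']}] {m['sender']}: {m['message']}" for m in relevant_msgs])
--     return f"""
-- Topic Analysis from WhatsApp:
--
-- {context}
--
-- Topic: "{query}"
-- Discuss who talked, what they said, and when.
-- """
-- ===== SOURCE B (Python) =====
-- def handle_topic_qa(query, chat_data):
--     query_words = set(query.lower().split())
--     max_score = len(query_words)
--     buckets = {}
--     for msg in chat_data:
--         score = len(query_words & set(msg["message"].lower().split()))
--         if score > 0:
--             buckets.setdefault(score, []).append(msg)
--     ordered = []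
--     for s in range(max_score, 0, -1):
--         ordered += buckets.get(s, [])
--     relevant_msgs = ordered[:25]
--     if not relevant_msgs:
--         return f"No messages found for topic in: '{query}'"
--     context = "\n".join([f"[{m['date']} {m['time']}] {m['sender']}: {m['message']}" for m in relevant_msgs])
--     return f"""
-- Topic Analysis from WhatsApp:
--
-- {context}
--
-- Topic: "{query}"
-- Discuss who talked, what they said, and when.
-- """
-- ===== Notes on version B (the rewrite author's own statement) =====
-- stated objective: alternative
-- what changed: Replaces collect-pairs-then-stable-sort with a bucket (counting-sort) pass: matching messages are appended to a dict keyed by score and the result is emitted by walking scores from len(query_words) down to 1, which preserves the stable descending order without a comparison sort.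
import Mathlib
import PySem

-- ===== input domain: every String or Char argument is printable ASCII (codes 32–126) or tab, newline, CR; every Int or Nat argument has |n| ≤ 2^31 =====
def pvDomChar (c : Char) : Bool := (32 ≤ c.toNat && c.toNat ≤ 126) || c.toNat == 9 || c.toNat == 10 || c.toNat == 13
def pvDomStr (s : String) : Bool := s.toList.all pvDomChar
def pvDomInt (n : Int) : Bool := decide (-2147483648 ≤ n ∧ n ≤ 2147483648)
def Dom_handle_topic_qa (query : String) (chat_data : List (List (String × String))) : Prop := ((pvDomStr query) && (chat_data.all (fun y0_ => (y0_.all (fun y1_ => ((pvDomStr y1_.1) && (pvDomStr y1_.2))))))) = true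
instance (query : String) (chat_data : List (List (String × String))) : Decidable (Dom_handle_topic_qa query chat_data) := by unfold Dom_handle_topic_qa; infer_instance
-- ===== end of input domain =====

-- B replaces A's collect-then-stable-sort with a bucket (counting) pass over scores; same output, alternative algorithm.


-- shared by both ports (identical in both Pythons): the word-overlap score and the f-string for one message
def pvScore (query_words : PySem.Set String) (msg : List (String × String)) : Int :=
  ((PySem.Set.inter query_words
      (PySem.Set.ofList (PySem.Str.split₀ (PySem.Str.lower ((PySem.Dict.ofList msg).getD "message" ""))))).length : Int)

def pvFmtMsg (msg : List (String × String)) : String :=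
  "[" ++ (PySem.Dict.ofList msg).getD "date" "" ++ " " ++ (PySem.Dict.ofList msg).getD "time" "" ++ "] "
    ++ (PySem.Dict.ofList msg).getD "sender" "" ++ ": " ++ (PySem.Dict.ofList msg).getD "message" ""

-- ===== PORT A =====
def retrieve_relevant_messages (query : String) (chat_data : List (List (String × String))) (top_k : Int) :
    List (List (String × String)) :=
  let query_words := PySem.Set.ofList (PySem.Str.split₀ (PySem.Str.lower query))
  let scored_messages := chat_data.foldl (fun acc msg =>
      let score := pvScore query_words msg
      if score > 0 then acc ++ [(score, msg)] else acc) []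
  let sorted_messages := PySem.List.sorted scored_messages (fun x => x.1) true
  (PySem.List.slice sorted_messages none (some top_k)).map (fun p => p.2)

def handle_topic_qa (query : String) (chat_data : List (List (String × String))) : String :=
  let relevant_msgs := retrieve_relevant_messages query chat_data 25
  if relevant_msgs = [] then "No messages found for topic in: '" ++ query ++ "'"
  else
    let context := PySem.Str.join "\n" (relevant_msgs.map pvFmtMsg)
    "\nTopic Analysis from WhatsApp:\n\n" ++ context ++ "\n\nTopic: \"" ++ query
      ++ "\"\nDiscuss who talked, what they said, and when.\n"

-- ===== PORT B =====
def handle_topic_qa_alt (query : String) (chat_data : List (List (String × String))) : String :=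
  let query_words := PySem.Set.ofList (PySem.Str.split₀ (PySem.Str.lower query))
  let max_score : Int := (query_words.length : Int)
  let buckets : PySem.Dict Int (List (List (String × String))) :=
    chat_data.foldl (fun b msg =>
      let score := pvScore query_words msg
      if score > 0 then b.modify score [] (fun v => v ++ [msg]) else b) PySem.Dict.empty
  let ordered := (PySem.List.pyRange max_score 0 (-1)).foldl (fun acc s => acc ++ buckets.getD s []) []
  let relevant_msgs := PySem.List.slice ordered none (some 25)
  if relevant_msgs = [] then "No messages found for topic in: '" ++ query ++ "'"
  else
    let context := PySem.Str.join "\n" (relevant_msgs.map pvFmtMsg)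
    "\nTopic Analysis from WhatsApp:\n\n" ++ context ++ "\n\nTopic: \"" ++ query
      ++ "\"\nDiscuss who talked, what they said, and when.\n"

-- ===== PRECONDITION & SPEC =====
-- Pre_ excludes inputs where some message dict lacks the "message" key (A raises KeyError) or a message that
-- shares a lowercased word with the query lacks "date"/"time"/"sender" (A raises KeyError when it formats it).
-- Slight narrowing, stated: it requires date/time/sender on EVERY matching message, while A only reads them on
-- the top 25 — when more than 25 messages match, an incomplete lower-ranked one is excluded although A returns.
def Pre_handle_topic_qa (query : String) (chat_data : List (List (String × String))) : Prop :=
  ∀ msg ∈ chat_data,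
    (PySem.Dict.ofList msg).contains "message" = true ∧
    ((∃ w ∈ PySem.Str.split₀ (PySem.Str.lower query),
        w ∈ PySem.Str.split₀ (PySem.Str.lower ((PySem.Dict.ofList msg).getD "message" ""))) →
      (PySem.Dict.ofList msg).contains "date" = true ∧
      (PySem.Dict.ofList msg).contains "time" = true ∧
      (PySem.Dict.ofList msg).contains "sender" = true)
instance (query : String) (chat_data : List (List (String × String))) : Decidable (Pre_handle_topic_qa query chat_data) := by unfold Pre_handle_topic_qa; infer_instance

def pvWitness_handle_topic_qa : String × (List (List (String × String))) :=
  ("a", [[("message", "a"), ("date", "d"), ("time", "t"), ("sender", "s")]])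

def Spec_handle_topic_qa (query : String) (chat_data : List (List (String × String))) (out : String) : Prop := out = handle_topic_qa_alt query chat_data
instance (query : String) (chat_data : List (List (String × String))) (out : String) : Decidable (Spec_handle_topic_qa query chat_data out) := by unfold Spec_handle_topic_qa; infer_instance

-- ===== CLAIM (what is proved, stated in full; the proofs are below) =====
def Claim_equal_handle_topic_qa : Prop := ∀ (query : String) (chat_data : List (List (String × String))), Dom_handle_topic_qa query chat_data → Pre_handle_topic_qa query chat_data → Spec_handle_topic_qa query chat_data (handle_topic_qa query chat_data)

-- ===== LEMMAS AND PROOFS =====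


-- ===== LEMMAS AND PROOFS =====

abbrev M := List (String × String)

def pvBuckets (sc : List (Int × M)) : Nat → List (Int × M)
  | 0 => []
  | n+1 => sc.filter (fun p => decide (p.1 = ((n : Int)+1))) ++ pvBuckets sc n

theorem pvBuckets_nil (n : Nat) : pvBuckets [] n = [] := by
  induction n with
  | zero => rfl
  | succ n ih => simp [pvBuckets, ih]

theorem mem_pvBuckets {sc : List (Int × M)} {n : Nat} {p : Int × M}
    (h : p ∈ pvBuckets sc n) : 1 ≤ p.1 ∧ p.1 ≤ (n : Int) := by
  induction n with
  | zero => simp [pvBuckets] at h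
  | succ n ih =>
    simp only [pvBuckets, List.mem_append, List.mem_filter] at h
    rcases h with ⟨-, h⟩ | h
    · simp at h; omega
    · have := ih h; push_cast; omega

theorem insertBy_skip {x : Int × M} {F R : List (Int × M)}
    (h : ∀ y ∈ F, ¬ (y.1 < x.1)) :
    PySem.List.insertBy (fun a b => decide (b.1 < a.1)) x (F ++ R)
      = F ++ PySem.List.insertBy (fun a b => decide (b.1 < a.1)) x R := by
  induction F with
  | nil => rfl
  | cons y F ih =>
    have hy : ¬ (y.1 < x.1) := h y (List.mem_cons_self ..)
    simp [PySem.List.insertBy, hy, ih (fun z hz => h z (List.mem_cons_of_mem _ hz))]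

theorem insertBy_front {x : Int × M} {R : List (Int × M)}
    (h : ∀ y ∈ R, y.1 < x.1) :
    PySem.List.insertBy (fun a b => decide (b.1 < a.1)) x R = x :: R := by
  cases R with
  | nil => rfl
  | cons y t => simp [PySem.List.insertBy, h y (List.mem_cons_self ..)]

theorem pvBuckets_append_gt {x : Int × M} {sc : List (Int × M)} {n : Nat}
    (h : (n : Int) < x.1) : pvBuckets (sc ++ [x]) n = pvBuckets sc n := by
  induction n with
  | zero => rfl
  | succ n ih =>
    have hx : ¬ (x.1 = (n : Int) + 1) := by push_cast at h; omega
    have ih' := ih (by push_cast at h ⊢; omega)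
    simp [pvBuckets, List.filter_append, hx, ih']

theorem insert_pvBuckets {x : Int × M} {n : Nat} (h1 : 1 ≤ x.1) (h2 : x.1 ≤ (n : Int))
    (sc : List (Int × M)) :
    PySem.List.insertBy (fun a b => decide (b.1 < a.1)) x (pvBuckets sc n)
      = pvBuckets (sc ++ [x]) n := by
  induction n with
  | zero => simp at h2; omega
  | succ n ih =>
    by_cases hx : x.1 = (n : Int) + 1
    · have hF : ∀ y ∈ sc.filter (fun p => decide (p.1 = ((n : Int)+1))), ¬ (y.1 < x.1) := by
        intro y hy; simp at hy; omega
      have hR : ∀ y ∈ pvBuckets sc n, y.1 < x.1 := by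
        intro y hy; have := mem_pvBuckets hy; omega
      rw [pvBuckets, insertBy_skip hF, insertBy_front hR]
      rw [pvBuckets, List.filter_append, pvBuckets_append_gt (by omega)]
      simp [hx]
    · have hx' : x.1 ≤ (n : Int) := by push_cast at h2; omega
      have hF : ∀ y ∈ sc.filter (fun p => decide (p.1 = ((n : Int)+1))), ¬ (y.1 < x.1) := by
        intro y hy; simp at hy; omega
      rw [pvBuckets, insertBy_skip hF, ih hx']
      rw [pvBuckets, List.filter_append]
      simp [hx]

theorem foldl_insertBy_pvBuckets {n : Nat} :
    ∀ (sc l : List (Int × M)), (∀ p ∈ sc, 1 ≤ p.1 ∧ p.1 ≤ (n : Int)) →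
    sc.foldl (fun acc x => PySem.List.insertBy (fun a b => decide (b.1 < a.1)) x acc) (pvBuckets l n)
      = pvBuckets (l ++ sc) n := by
  intro sc
  induction sc with
  | nil => intro l _; simp
  | cons x rest ih =>
    intro l h
    have hx := h x (List.mem_cons_self ..)
    simp only [List.foldl_cons]
    rw [insert_pvBuckets hx.1 hx.2 l]
    rw [ih (l ++ [x]) (fun p hp => h p (List.mem_cons_of_mem _ hp))]
    simp

theorem sorted_eq_pvBuckets {n : Nat} {sc : List (Int × M)}
    (h : ∀ p ∈ sc, 1 ≤ p.1 ∧ p.1 ≤ (n : Int)) :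
    PySem.List.sorted sc (fun x => x.1) true = pvBuckets sc n := by
  rw [PySem.List.sorted_rev_eq_foldl_insertBy]
  have := foldl_insertBy_pvBuckets sc [] h
  rwa [pvBuckets_nil, List.nil_append] at this

def scoredOf (f : M → Int) (l : List M) : List (Int × M) :=
  (l.filter (fun m => decide (0 < f m))).map (fun m => (f m, m))

theorem scoredOf_eq_foldl (f : M → Int) (l : List M) :
    l.foldl (fun acc msg => if 0 < f msg then acc ++ [(f msg, msg)] else acc) [] = scoredOf f l := by
  have h := PySem.List.foldl_append_if (fun m => decide (0 < f m)) (fun m => (f m, m)) l []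
  simpa [scoredOf] using h

theorem dict_fold_getD (f : M → Int) :
    ∀ (l : List M) (b : PySem.Dict Int (List M)) (sc : List (Int × M)),
    (∀ s, b.getD s [] = (sc.filter (fun p => decide (p.1 = s))).map (·.2)) →
    ∀ s, (l.foldl (fun b msg => if 0 < f msg then b.modify (f msg) [] (fun v => v ++ [msg]) else b) b).getD s []
       = ((sc ++ scoredOf f l).filter (fun p => decide (p.1 = s))).map (·.2) := by
  intro l
  induction l with
  | nil => intro b sc h s; simp [scoredOf, h s]
  | cons m rest ih =>
    intro b sc h s
    by_cases hm : 0 < f m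
    · have h' : ∀ s, (b.modify (f m) [] (fun v => v ++ [m])).getD s []
          = ((sc ++ [(f m, m)]).filter (fun p => decide (p.1 = s))).map (·.2) := by
        intro s
        rw [PySem.Dict.getD_modify]
        by_cases hs : s = f m
        · simp [hs, h (f m)]
        · simp [hs, h s, Ne.symm hs]
      simp only [List.foldl_cons, if_pos hm]
      rw [ih _ _ h']
      simp [scoredOf, hm]
    · simp only [List.foldl_cons, if_neg hm]
      rw [ih _ _ h]
      simp [scoredOf, hm]

theorem pyRange_desc (n : Nat) :
    PySem.List.pyRange (n : Int) 0 (-1) = (List.range n).map (fun k : Nat => (n : Int) - (k : Int)) := by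
  by_cases hn : 0 < n
  · have h2 : (0 : Int) < (n : Int) := by exact_mod_cast hn
    simp only [PySem.List.pyRange]
    rw [if_neg (by norm_num), if_neg (by norm_num), if_pos h2]
    have hc : (((n : Int) - 0 + -(-1) - 1) / -(-1)).toNat = n := by norm_num
    rw [hc]
    apply List.map_congr_left
    intro k _; ring
  · have h0 : n = 0 := by omega
    subst h0; rfl

theorem flatMap_desc_eq_pvBuckets (sc : List (Int × M)) (n : Nat) :
    ((List.range n).map (fun k : Nat => (n : Int) - (k : Int))).flatMap
        (fun s => (sc.filter (fun p => decide (p.1 = s))).map (·.2))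
      = (pvBuckets sc n).map (·.2) := by
  induction n with
  | zero => rfl
  | succ n ih =>
    rw [List.range_succ_eq_map]
    simp only [List.map_cons, List.flatMap_cons, List.map_map]
    have hc : ((List.range n).map ((fun k : Nat => ((n+1 : Nat) : Int) - (k : Int)) ∘ Nat.succ))
        = (List.range n).map (fun k : Nat => (n : Int) - (k : Int)) := by
      apply List.map_congr_left; intro k _; simp [Function.comp]
    rw [hc, ih]
    simp only [pvBuckets, List.map_append]
    norm_num

theorem relevant_eq (query : String) (chat_data : List M) :
    (PySem.List.slice
        (PySem.List.sorted
          (chat_data.foldl (fun acc msg =>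
            if 0 < pvScore (PySem.Set.ofList (PySem.Str.split₀ (PySem.Str.lower query))) msg then
              acc ++ [(pvScore (PySem.Set.ofList (PySem.Str.split₀ (PySem.Str.lower query))) msg, msg)]
            else acc) [])
          (fun x => x.1) true)
        none (some 25)).map (fun p => p.2)
    = PySem.List.slice
        ((PySem.List.pyRange (((PySem.Set.ofList (PySem.Str.split₀ (PySem.Str.lower query))).length : Int)) 0 (-1)).foldl
          (fun acc s => acc ++
            (chat_data.foldl (fun b msg =>
              if 0 < pvScore (PySem.Set.ofList (PySem.Str.split₀ (PySem.Str.lower query))) msg then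
                b.modify (pvScore (PySem.Set.ofList (PySem.Str.split₀ (PySem.Str.lower query))) msg) [] (fun v => v ++ [msg])
              else b) PySem.Dict.empty).getD s []) [])
        none (some 25) := by
  set qw := PySem.Set.ofList (PySem.Str.split₀ (PySem.Str.lower query)) with hqw
  rw [scoredOf_eq_foldl]
  have hb : ∀ p ∈ scoredOf (pvScore qw) chat_data, 1 ≤ p.1 ∧ p.1 ≤ (qw.length : Int) := by
    intro p hp
    simp only [scoredOf, List.mem_map, List.mem_filter] at hp
    obtain ⟨m, ⟨-, hm⟩, rfl⟩ := hp
    simp only [decide_eq_true_eq] at hm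
    refine ⟨by omega, ?_⟩
    show pvScore qw m ≤ _
    simp only [pvScore, PySem.Set.inter]
    exact_mod_cast List.length_filter_le _ _
  rw [sorted_eq_pvBuckets hb]
  rw [PySem.List.foldl_append_eq_flatMap]
  have hd : (fun s => (chat_data.foldl (fun b msg =>
        if 0 < pvScore qw msg then b.modify (pvScore qw msg) [] (fun v => v ++ [msg]) else b)
        PySem.Dict.empty).getD s [])
      = (fun s => ((scoredOf (pvScore qw) chat_data).filter (fun p => decide (p.1 = s))).map (·.2)) := by
    funext s
    have h := dict_fold_getD (pvScore qw) chat_data PySem.Dict.empty []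
      (fun s => by simp) s
    simpa using h
  rw [hd, pyRange_desc, flatMap_desc_eq_pvBuckets]
  rw [PySem.List.slice_to _ (by norm_num), PySem.List.slice_to _ (by norm_num)]
  simp [List.map_take]

-- ===== VERDICT (by name: the statement is the Claim_ definition above) =====
theorem handle_topic_qa_spec : Claim_equal_handle_topic_qa := by
  intro query chat_data _ _
  simp only [Spec_handle_topic_qa, handle_topic_qa,
    handle_topic_qa_alt, retrieve_relevant_messages, gt_iff_lt]
  rw [relevant_eq]
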